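-- pv_equiv track=rewrite | github.com/brrgi/Algorithms | 프로그래머스/2021 카카오 채용연계형 인턴십/지영/표편집.py | solution
-- ===== SOURCE A (Python) =====
-- UP = 'U'
--
-- DOWN ='D'
--
-- DELETE = 'C'
--
-- REVERT = 'Z'
--
-- PREV = 0
--
-- NEXT = 1
--
-- def solution(n, k, cmd):
--     linked = {0: [n-1, 1]}
--     deleted = []
--
--     for val in range(1, n):
--         if val == n - 1:
--             linked[val] = [val-1, 0]
--             continue
--         linked[val] = [val - 1, val + 1]
--
--     pointer = k
--     for elm in cmd:
--         splited =  elm.split()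
--
--         if splited[0] == UP:
--
--             cnt = 0
--             while (cnt < int(splited[1])):
--                 pointer = linked[pointer][PREV]
--                 cnt += 1
--             continue
--
--         if splited[0] == DOWN:
--
--             cnt = 0
--             while (cnt < int(splited[1])):
--                 pointer = linked[pointer][NEXT]
--                 cnt += 1
--             continue
--
--         if splited[0] == DELETE:
--             prev, next = linked[pointer]
--             deleted.append([pointer, [prev, next]])
--
--             linked[prev][NEXT] = next
--             linked[next][PREV] = prev
--
--
--             del linked[pointer]
--
--             if next == 0:
--                 pointer = prev
--             else: pointer = next
--
--             continue
--
--         if splited[0] == REVERT: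
--             node, linked_nodes = deleted.pop()
--
--             linked[node] = linked_nodes
--             linked[linked_nodes[PREV]][NEXT] = node
--             linked[linked_nodes[NEXT]][PREV] = node
--
--             continue
--
--     answer = ''
--     for val in range(n):
--         if val not in linked.keys():
--             answer += 'X'
--             continue
--         answer += 'O'
--
--
--     return answer
-- ===== SOURCE B (Python) =====
-- def _scan(alive, i, delta):
--     # first alive index reached from i by steps of `delta` on the circular table
--     n = len(alive)
--     for d in range(1, n + 1):
--         j = (i + delta * d) % n
--         if alive[j]:
--             return j
--     return i
--
--
-- def solution(n, k, cmd):
--     alive = [True] * n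
--     stack = []
--     cur = k
--     for line in cmd:
--         t = line.split()
--         op = t[0]
--         if op == 'U':
--             for _ in range(int(t[1])):
--                 cur = _scan(alive, cur, -1)
--         elif op == 'D':
--             for _ in range(int(t[1])):
--                 cur = _scan(alive, cur, 1)
--         elif op == 'C':
--             nxt = _scan(alive, cur, 1)
--             prv = _scan(alive, cur, -1)
--             alive[cur] = False
--             stack.append(cur)
--             cur = prv if nxt == 0 else nxt
--         elif op == 'Z':
--             alive[stack.pop()] = True
--     return ''.join('O' if a else 'X' for a in alive)
-- ===== Notes on version B (the rewrite author's own statement) =====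
-- stated objective: alternative
-- what changed: A maintains a circular doubly-linked list as a dict of [prev,next] pairs (relinking on delete and reverting from stored neighbour pairs); B keeps only a boolean alive[] array plus a stack of deleted indices, finds neighbours by circular scanning, reverts by flipping a flag, and renders the answer directly from the array.
-- outside the precondition, e.g. on solution(1, 0, ['D 1']): A returns 'O', B returns 'O'; on solution(2, 0, ['C', 'C', 'Z', 'Z']): A returns 'OO', B returns 'OO'
import Mathlib
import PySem

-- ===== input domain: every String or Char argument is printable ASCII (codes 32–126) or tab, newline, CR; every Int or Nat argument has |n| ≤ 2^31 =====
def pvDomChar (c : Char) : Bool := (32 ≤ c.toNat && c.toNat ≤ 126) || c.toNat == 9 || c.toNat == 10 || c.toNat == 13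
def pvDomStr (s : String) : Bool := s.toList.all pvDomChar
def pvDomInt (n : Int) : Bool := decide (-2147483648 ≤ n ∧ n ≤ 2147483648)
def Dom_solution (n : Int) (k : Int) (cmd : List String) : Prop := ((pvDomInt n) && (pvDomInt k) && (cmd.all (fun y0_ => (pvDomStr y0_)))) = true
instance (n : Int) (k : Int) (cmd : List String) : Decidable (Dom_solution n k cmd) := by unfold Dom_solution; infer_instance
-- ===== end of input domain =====

-- B replaces A's hand-maintained circular doubly-linked dict (with stored-neighbour revert) by a
-- boolean alive[] array, a stack of deleted indices and circular scans for the cursor moves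
-- (objective: alternative — a different data structure of similar cost, not claimed faster).

-- ===== PORT A =====
-- A's `pointer = linked[pointer][i]` (i = 0 PREV / 1 NEXT); missing keys are excluded by Pre_.
def pvFollow (linked : PySem.Dict Int (List Int)) (i : Int) (p : Int) : Int :=
  (PySem.List.pyGet? ((PySem.Dict.get? linked p).getD []) i).getD 0

-- A's `while cnt < x: pointer = linked[pointer][i]; cnt += 1` run m = max(x,0) times
def pvHopA (linked : PySem.Dict Int (List Int)) (i : Int) : Nat → Int → Int
  | 0, p => p
  | m + 1, p => pvHopA linked i m (pvFollow linked i p)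

-- A's initialisation loop: {0: [n-1, 1]} then val = 1 .. n-1
def pvInitLinked (n : Int) : PySem.Dict Int (List Int) :=
  (PySem.List.pyRange 1 n 1).foldl
    (fun d val =>
      if val = n - 1 then PySem.Dict.insert d val [val - 1, 0]
      else PySem.Dict.insert d val [val - 1, val + 1])
    (PySem.Dict.insert PySem.Dict.empty 0 [n - 1, 1])

-- the body of A's `for elm in cmd` loop; state = (linked, deleted, pointer)
def pvStepA (st : PySem.Dict Int (List Int) × List (Int × List Int) × Int) (elm : String) :
    PySem.Dict Int (List Int) × List (Int × List Int) × Int :=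
  let splited := PySem.Str.split₀ elm
  let linked := st.1
  let deleted := st.2.1
  let pointer := st.2.2
  let op := (PySem.List.pyGet? splited 0).getD ""
  if op = "U" then
    let x := (PySem.Int.ofStr? ((PySem.List.pyGet? splited 1).getD "")).getD 0
    (linked, deleted, pvHopA linked 0 x.toNat pointer)
  else if op = "D" then
    let x := (PySem.Int.ofStr? ((PySem.List.pyGet? splited 1).getD "")).getD 0
    (linked, deleted, pvHopA linked 1 x.toNat pointer)
  else if op = "C" then
    let pn := (PySem.Dict.get? linked pointer).getD []
    let prev := (PySem.List.pyGet? pn 0).getD 0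
    let next := (PySem.List.pyGet? pn 1).getD 0
    let l1 := PySem.Dict.modify linked prev [] (fun l => l.set 1 next)
    let l2 := PySem.Dict.modify l1 next [] (fun l => l.set 0 prev)
    let l3 := PySem.Dict.erase l2 pointer
    (l3, deleted ++ [(pointer, [prev, next])], if next = 0 then prev else next)
  else if op = "Z" then
    match PySem.List.pop? deleted with
    | none => (linked, deleted, pointer)   -- Python raises IndexError here; excluded by Pre_
    | some ((node, ln), rest) =>
      let l1 := PySem.Dict.insert linked node ln
      let l2 := PySem.Dict.modify l1 ((PySem.List.pyGet? ln 0).getD 0) [] (fun l => l.set 1 node)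
      let l3 := PySem.Dict.modify l2 ((PySem.List.pyGet? ln 1).getD 0) [] (fun l => l.set 0 node)
      (l3, rest, pointer)
  else (linked, deleted, pointer)

def solution (n : Int) (k : Int) (cmd : List String) : String :=
  let st := cmd.foldl pvStepA (pvInitLinked n, ([] : List (Int × List Int)), k)
  (PySem.List.pyRange 0 n 1).foldl
    (fun ans val => ans ++ (if PySem.Dict.contains st.1 val = false then "X" else "O")) ""

-- ===== PORT B =====
-- Source B's _scan: first alive index reached from i by steps of delta on the circular table
def pvScan (alive : List Bool) (i : Int) (delta : Int) : Int :=
  ((PySem.List.pyRange 1 ((alive.length : Int) + 1) 1).findSome? (fun d =>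
      let j := PySem.Int.mod (i + delta * d) (alive.length : Int)
      if (PySem.List.pyGet? alive j).getD false then some j else none)).getD i

-- Source B's `for _ in range(int(t[1])): cur = _scan(...)`
def pvRepScan (alive : List Bool) (delta : Int) : Nat → Int → Int
  | 0, c => c
  | m + 1, c => pvRepScan alive delta m (pvScan alive c delta)

-- the body of Source B's command loop; state = (alive, stack, cur)
def pvStepB (st : List Bool × List Int × Int) (line : String) : List Bool × List Int × Int :=
  let t := PySem.Str.split₀ line
  let alive := st.1
  let stack := st.2.1
  let cur := st.2.2
  let op := (PySem.List.pyGet? t 0).getD ""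
  if op = "U" then
    let x := (PySem.Int.ofStr? ((PySem.List.pyGet? t 1).getD "")).getD 0
    (alive, stack, pvRepScan alive (-1) x.toNat cur)
  else if op = "D" then
    let x := (PySem.Int.ofStr? ((PySem.List.pyGet? t 1).getD "")).getD 0
    (alive, stack, pvRepScan alive 1 x.toNat cur)
  else if op = "C" then
    let nxt := pvScan alive cur 1
    let prv := pvScan alive cur (-1)
    (PySem.List.pySetD alive cur false, stack ++ [cur], if nxt = 0 then prv else nxt)
  else if op = "Z" then
    match PySem.List.pop? stack with
    | none => (alive, stack, cur)   -- Python raises IndexError here; excluded by Pre_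
    | some (v, rest) => (PySem.List.pySetD alive v true, rest, cur)
  else (alive, stack, cur)

def solution_alt (n : Int) (k : Int) (cmd : List String) : String :=
  let st := cmd.foldl pvStepB (List.replicate n.toNat true, ([] : List Int), k)
  PySem.Str.join "" (st.1.map (fun a => if a then "O" else "X"))

-- ===== PRECONDITION & SPEC =====
def pvOp (c : String) : String := (PySem.List.pyGet? (PySem.Str.split₀ c) 0).getD ""
def pvXval (c : String) : Int :=
  (PySem.Int.ofStr? ((PySem.List.pyGet? (PySem.Str.split₀ c) 1).getD "")).getD 0

-- a command string is well-formed for A: it has a first token, and a `U`/`D` command carries a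
-- second token that Python's int() accepts
abbrev pvWF (c : String) : Prop :=
  PySem.Str.split₀ c ≠ [] ∧
    ((pvOp c = "U" ∨ pvOp c = "D") →
      2 ≤ (PySem.Str.split₀ c).length ∧
        (PySem.Int.ofStr? ((PySem.List.pyGet? (PySem.Str.split₀ c) 1).getD "")).isSome = true)

-- a command that touches nothing: not a delete/revert, and a move of a non-positive count
abbrev pvNoop (c : String) : Prop :=
  PySem.Str.split₀ c ≠ [] ∧ pvOp c ≠ "C" ∧ pvOp c ≠ "Z" ∧
    ((pvOp c = "U" ∨ pvOp c = "D") →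
      2 ≤ (PySem.Str.split₀ c).length ∧
        (PySem.Int.ofStr? ((PySem.List.pyGet? (PySem.Str.split₀ c) 1).getD "")).isSome = true ∧
        pvXval c ≤ 0)

def pvCntC (cs : List String) : Int :=
  (cs.countP (fun c => (PySem.List.pyGet? (PySem.Str.split₀ c) 0).getD "" == "C") : Int)
def pvCntZ (cs : List String) : Int :=
  (cs.countP (fun c => (PySem.List.pyGet? (PySem.Str.split₀ c) 0).getD "" == "Z") : Int)

-- Pre_ covers (i) the task's natural domain — n ≥ 2 rows, a valid start row 0 ≤ k < n, well-formed
-- commands, no revert without a matching delete, never deleting all rows — and (ii) command lists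
-- whose commands touch nothing (no C/Z, moves with non-positive counts), where n and k are free.
-- Outside Pre_ A raises (KeyError/IndexError/ValueError) except on degenerate inputs that reach a
-- corrupted state but stop before using it (e.g. n = 1 with "D 1", or emptying the whole table and
-- only reverting afterwards); characterising those exactly would mean simulating A, and B agrees
-- with A on them anyway.
def Pre_solution (n : Int) (k : Int) (cmd : List String) : Prop :=
  (2 ≤ n ∧ 0 ≤ k ∧ k < n ∧ (∀ c ∈ cmd, pvWF c) ∧
    ∀ i : Nat, i < cmd.length + 1 →
      pvCntZ (cmd.take i) ≤ pvCntC (cmd.take i) ∧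
      pvCntC (cmd.take i) - pvCntZ (cmd.take i) ≤ n - 1) ∨
  (∀ c ∈ cmd, pvNoop c)

instance (n : Int) (k : Int) (cmd : List String) : Decidable (Pre_solution n k cmd) := by
  unfold Pre_solution; infer_instance

def pvWitness_solution : Int × Int × List String := (3, 1, ["D 1", "C", "U 2", "C", "Z", "Z"])

def Spec_solution (n : Int) (k : Int) (cmd : List String) (out : String) : Prop := out = solution_alt n k cmd
instance (n : Int) (k : Int) (cmd : List String) (out : String) : Decidable (Spec_solution n k cmd out) := by unfold Spec_solution; infer_instance

-- ===== CLAIM (what is proved, stated in full; the proofs are below) =====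
def Claim_equal_solution : Prop := ∀ (n : Int) (k : Int) (cmd : List String), Dom_solution n k cmd → Pre_solution n k cmd → Spec_solution n k cmd (solution n k cmd)

-- ===== LEMMAS AND PROOFS =====

def pvAliveAt (alive : List Bool) (j : Int) : Bool := alive[j.toNat]?.getD false

def pvHit (alive : List Bool) (i δ d : Int) : Bool :=
  pvAliveAt alive ((i + δ * d) % (alive.length : Int))

lemma pvScan_fun_eq (alive : List Bool) (i δ : Int) (h : 0 < alive.length) :
    (fun d => (let j := PySem.Int.mod (i + δ * d) (alive.length : Int);
      if (PySem.List.pyGet? alive j).getD false then some j else none : Option Int)) =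
    (fun d => if pvHit alive i δ d then some ((i + δ * d) % (alive.length : Int)) else none) := by
  funext d
  have hpos : (0:Int) < (alive.length : Int) := by exact_mod_cast h
  simp only [PySem.Int.mod_eq_emod_of_pos hpos]
  have h0 : 0 ≤ (i + δ * d) % (alive.length : Int) := Int.emod_nonneg _ (by omega)
  rw [PySem.List.pyGet?_of_nonneg alive h0]
  simp [pvHit, pvAliveAt]

lemma pvScan_eq_of_least (alive : List Bool) (i δ d₀ : Int) (h : 0 < alive.length)
    (h1 : 1 ≤ d₀) (h2 : d₀ ≤ (alive.length : Int))
    (hhit : pvHit alive i δ d₀ = true)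
    (hmin : ∀ e, 1 ≤ e → e < d₀ → pvHit alive i δ e = false) :
    pvScan alive i δ = (i + δ * d₀) % (alive.length : Int) := by
  unfold pvScan
  rw [pvScan_fun_eq alive i δ h]
  rw [PySem.List.pyRange_one_append 1 d₀ ((alive.length : Int) + 1) h1 (by omega)]
  rw [List.findSome?_append]
  have hnone : (PySem.List.pyRange 1 d₀).findSome?
      (fun d => if pvHit alive i δ d then some ((i + δ * d) % (alive.length : Int)) else none) = none := by
    apply List.findSome?_eq_none_iff.mpr
    intro x hx
    rw [PySem.List.mem_pyRange_one] at hx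
    simp [hmin x hx.1 hx.2]
  rw [hnone, PySem.List.pyRange_one_cons (by omega), List.findSome?_cons]
  simp [hhit]

lemma pvScan_spec (alive : List Bool) (i δ : Int) (hδ : δ = 1 ∨ δ = -1) (h : 0 < alive.length)
    (t : Int) (ht0 : 0 ≤ t) (htn : t < (alive.length : Int)) (hta : pvAliveAt alive t = true) :
    ∃ d₀ : Int, 1 ≤ d₀ ∧ d₀ ≤ (alive.length : Int) ∧ pvHit alive i δ d₀ = true ∧
      (∀ e, 1 ≤ e → e < d₀ → pvHit alive i δ e = false) ∧
      pvScan alive i δ = (i + δ * d₀) % (alive.length : Int) := by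
  have hnpos : (0:Int) < (alive.length : Int) := by exact_mod_cast h
  set n : Int := (alive.length : Int) with hn
  have hex : ∃ d : Int, 1 ≤ d ∧ d ≤ n ∧ pvHit alive i δ d = true := by
    by_cases hr0' : (δ * (t - i)) % n = 0
    · refine ⟨n, by omega, le_refl n, ?_⟩
      have hdvd : n ∣ δ * (t - i) := Int.dvd_of_emod_eq_zero hr0'
      have hdvd' : n ∣ (i - t) := by
        rcases hδ with h1 | h1 <;> subst h1
        · have h2 : n ∣ (t - i) := by simpa using hdvd
          have h3 := Int.dvd_neg.mpr h2
          simpa [neg_sub] using h3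
        · simpa using hdvd
      have htar : (i + δ * n) % n = t := by
        have e1 : i + δ * n = i + n * δ := by ring
        rw [e1, Int.add_mul_emod_self_left]
        have : (i - t) % n = 0 := Int.emod_eq_zero_of_dvd hdvd'
        have e2 : i % n = t % n := Int.emod_eq_emod_iff_emod_sub_eq_zero.mpr this
        rw [e2, Int.emod_eq_of_lt ht0 htn]
      unfold pvHit
      rw [← hn, htar]
      exact hta
    · set r : Int := (δ * (t - i)) % n with hr
      have hr0 : 0 ≤ r := Int.emod_nonneg _ (by omega)
      have hrn : r < n := Int.emod_lt_of_pos _ hnpos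
      refine ⟨r, by omega, by omega, ?_⟩
      have hdm : δ * (t - i) = n * (δ * (t - i) / n) + r := by
        rw [hr, Int.emod_def]; ring
      have htar : (i + δ * r) % n = t := by
        have e1 : i + δ * r = t + n * (-(δ * (δ * (t - i) / n))) := by
          rcases hδ with h1 | h1 <;> subst h1 <;> nlinarith [hdm]
        rw [e1, Int.add_mul_emod_self_left, Int.emod_eq_of_lt ht0 htn]
      unfold pvHit
      rw [← hn, htar]
      exact hta
  obtain ⟨d, hd1, hdn, hdh⟩ := hex
  have hP : ∃ m : Nat, pvHit alive i δ ((m : Int) + 1) = true := by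
    refine ⟨(d - 1).toNat, ?_⟩
    have heq : ((d - 1).toNat : Int) + 1 = d := by omega
    rw [heq]; exact hdh
  have hfind := Nat.find_spec hP
  have hle : Nat.find hP ≤ (d - 1).toNat := Nat.find_min' hP (by
    have heq : (((d - 1).toNat : Nat) : Int) + 1 = d := by omega
    rw [heq]; exact hdh)
  have hmin : ∀ e, 1 ≤ e → e < (Nat.find hP : Int) + 1 → pvHit alive i δ e = false := by
    intro e he1 he2
    have hm : (e - 1).toNat < Nat.find hP := by omega
    have hmin0 := Nat.find_min hP hm
    have heq : ((e - 1).toNat : Int) + 1 = e := by omega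
    rw [heq] at hmin0
    simpa using hmin0
  refine ⟨(Nat.find hP : Int) + 1, by omega, by omega, hfind, hmin, ?_⟩
  exact pvScan_eq_of_least alive i δ _ h (by omega) (by omega) hfind hmin

lemma pvScan_valid (alive : List Bool) (i δ : Int) (hδ : δ = 1 ∨ δ = -1) (h : 0 < alive.length)
    (t : Int) (ht0 : 0 ≤ t) (htn : t < (alive.length : Int)) (hta : pvAliveAt alive t = true) :
    0 ≤ pvScan alive i δ ∧ pvScan alive i δ < (alive.length : Int) ∧
      pvAliveAt alive (pvScan alive i δ) = true := by
  obtain ⟨d₀, h1, h2, hhit, hmin, hsc⟩ := pvScan_spec alive i δ hδ h t ht0 htn hta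
  have hnpos : (0:Int) < (alive.length : Int) := by exact_mod_cast h
  rw [hsc]
  exact ⟨Int.emod_nonneg _ (by omega), Int.emod_lt_of_pos _ hnpos, hhit⟩

lemma pvHit_target_inj (alive : List Bool) (i δ : Int) (hδ : δ = 1 ∨ δ = -1)
    (h : 0 < alive.length) (e e' : Int) (he : 1 ≤ e) (he2 : e ≤ (alive.length : Int))
    (he' : 1 ≤ e') (he2' : e' ≤ (alive.length : Int))
    (heq : (i + δ * e) % (alive.length : Int) = (i + δ * e') % (alive.length : Int)) : e = e' := by
  have hnpos : (0:Int) < (alive.length : Int) := by exact_mod_cast h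
  set n : Int := (alive.length : Int) with hn
  have h0 : ((i + δ * e) - (i + δ * e')) % n = 0 := Int.emod_eq_emod_iff_emod_sub_eq_zero.mp heq
  have h1 : (δ * (e - e')) % n = 0 := by
    have : (i + δ * e) - (i + δ * e') = δ * (e - e') := by ring
    rwa [this] at h0
  have hdvd : n ∣ δ * (e - e') := Int.dvd_of_emod_eq_zero h1
  have hdvd' : n ∣ (e - e') := by
    rcases hδ with hh | hh <;> subst hh
    · simpa using hdvd
    · have h2 : n ∣ (e' - e) := by simpa using hdvd
      have h3 := Int.dvd_neg.mpr h2
      simpa [neg_sub] using h3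
  have := Int.eq_zero_of_abs_lt_dvd hdvd' (by rw [abs_lt]; omega)
  omega

-- pred/succ are inverse on the alive set
lemma pvScan_inv (alive : List Bool) (a b δ : Int) (hδ : δ = 1 ∨ δ = -1) (h : 0 < alive.length)
    (ha0 : 0 ≤ a) (han : a < (alive.length : Int)) (haa : pvAliveAt alive a = true)
    (hb0 : 0 ≤ b) (hbn : b < (alive.length : Int)) (hba : pvAliveAt alive b = true)
    (hab : pvScan alive a δ = b) : pvScan alive b (-δ) = a := by
  have hnpos : (0:Int) < (alive.length : Int) := by exact_mod_cast h
  set n : Int := (alive.length : Int) with hn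
  obtain ⟨d, hd1, hdn, hdh, hdmin, hdsc⟩ := pvScan_spec alive a δ hδ h a ha0 han haa
  have hbd : b = (a + δ * d) % n := by rw [← hdsc, hab]
  have hhit : pvHit alive b (-δ) d = true := by
    unfold pvHit
    rw [← hn, hbd]
    have : ((a + δ * d) % n + -δ * d) % n = (a + δ * d + -δ * d) % n := Int.emod_add_emod _ _ _
    rw [this]
    have e1 : a + δ * d + -δ * d = a := by ring
    rw [e1, Int.emod_eq_of_lt ha0 han]
    exact haa
  have hmiss : ∀ e, 1 ≤ e → e < d → pvHit alive b (-δ) e = false := by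
    intro e he1 he2
    unfold pvHit
    rw [← hn, hbd]
    have : ((a + δ * d) % n + -δ * e) % n = (a + δ * d + -δ * e) % n := Int.emod_add_emod _ _ _
    rw [this]
    have e1 : a + δ * d + -δ * e = a + δ * (d - e) := by ring
    rw [e1]
    exact hdmin (d - e) (by omega) (by omega)
  have := pvScan_eq_of_least alive b (-δ) d h hd1 hdn hhit hmiss
  rw [this, ← hn, hbd]
  have e2 : ((a + δ * d) % n + -δ * d) % n = (a + δ * d + -δ * d) % n := Int.emod_add_emod _ _ _
  rw [e2]
  have e3 : a + δ * d + -δ * d = a := by ring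
  rw [e3, Int.emod_eq_of_lt ha0 han]

lemma pvAliveAt_set (alive : List Bool) (p t : Int) (b : Bool)
    (hp0 : 0 ≤ p) (ht0 : 0 ≤ t) (htn : t < (alive.length : Int)) :
    pvAliveAt (alive.set p.toNat b) t = if t = p then b else pvAliveAt alive t := by
  unfold pvAliveAt
  rw [List.getElem?_set]
  have htl : t.toNat < alive.length := by omega
  by_cases hx : t = p
  · subst hx
    simp [htl]
  · have : ¬ (p.toNat = t.toNat) := by omega
    simp [this, hx]

lemma pvScan_del (alive : List Bool) (p j δ : Int) (hδ : δ = 1 ∨ δ = -1) (h : 0 < alive.length)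
    (hp0 : 0 ≤ p) (hpn : p < (alive.length : Int)) (hpa : pvAliveAt alive p = true)
    (hj0 : 0 ≤ j) (hjn : j < (alive.length : Int)) (hja : pvAliveAt alive j = true) (hjp : j ≠ p) :
    pvScan (alive.set p.toNat false) j δ =
      if pvScan alive j δ = p then pvScan alive p δ else pvScan alive j δ := by
  have hnpos : (0:Int) < (alive.length : Int) := by exact_mod_cast h
  set n : Int := (alive.length : Int) with hn
  set alive' : List Bool := alive.set p.toNat false with ha'
  have hlen : alive'.length = alive.length := by simp [ha']
  have hlen' : (alive'.length : Int) = n := by rw [hlen]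
  have hpos' : 0 < alive'.length := by omega
  -- hits of alive' in terms of hits of alive
  have hhit' : ∀ e : Int, pvHit alive' j δ e =
      (if (j + δ * e) % n = p then false else pvHit alive j δ e) := by
    intro e
    unfold pvHit
    rw [hlen', ← hn]
    rw [ha']
    rw [pvAliveAt_set alive p _ false hp0
      (Int.emod_nonneg _ (by omega)) (Int.emod_lt_of_pos _ hnpos)]
  have hstep : ∀ e f : Int, ((j + δ * e) % n + δ * f) % n = (j + δ * (e + f)) % n := by
    intro e f
    rw [Int.emod_add_emod]
    ring_nf
  obtain ⟨d1, hd11, hd1n, hd1h, hd1min, hd1sc⟩ := pvScan_spec alive j δ hδ h j hj0 hjn hja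
  by_cases hcase : (j + δ * d1) % n = p
  · -- the deleted node was j's neighbour: jump over it
    obtain ⟨d2, hd21, hd2n, hd2h, hd2min, hd2sc⟩ := pvScan_spec alive p δ hδ h j hj0 hjn hja
    have hd1lt : d1 < n := by
      rcases lt_or_eq_of_le hd1n with hlt | heq
      · exact hlt
      · exfalso
        apply hjp
        rw [← hcase, heq]
        have e1 : j + δ * n = j + n * δ := by ring
        rw [e1, Int.add_mul_emod_self_left, Int.emod_eq_of_lt hj0 hjn]
    have hd2le : d2 ≤ n - d1 := by
      by_contra hc
      have hmiss := hd2min (n - d1) (by omega) (by omega)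
      have : pvHit alive p δ (n - d1) = true := by
        unfold pvHit
        rw [← hn, ← hcase, hstep]
        have e1 : d1 + (n - d1) = n := by ring
        rw [e1]
        have e2 : j + δ * n = j + n * δ := by ring
        rw [e2, Int.add_mul_emod_self_left, Int.emod_eq_of_lt hj0 hjn]
        exact hja
      rw [this] at hmiss
      exact Bool.true_eq_false.mp hmiss
    -- the target of d1 + d2 in alive'
    have htgt : (j + δ * (d1 + d2)) % n = (p + δ * d2) % n := by
      rw [← hcase, hstep]
    have hsne : (p + δ * d2) % n ≠ p := by
      intro hc
      have hpn' : (p + δ * n) % n = p := by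
        have e1 : p + δ * n = p + n * δ := by ring
        rw [e1, Int.add_mul_emod_self_left, Int.emod_eq_of_lt hp0 hpn]
      have := pvHit_target_inj alive p δ hδ h d2 n hd21 hd2n (by omega) (le_refl n)
        (by rw [hc, hpn'])
      omega
    have hscan' : pvScan alive' j δ = (j + δ * (d1 + d2)) % n := by
      rw [← hlen']
      apply pvScan_eq_of_least alive' j δ (d1 + d2) hpos' (by omega) (by rw [hlen']; omega)
      · rw [hhit' (d1 + d2), htgt, if_neg hsne]
        unfold pvHit at hd2h ⊢
        rw [← hn] at hd2h ⊢
        rw [htgt]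
        exact hd2h
      · intro e he1 he2
        rw [hhit' e]
        by_cases hep : (j + δ * e) % n = p
        · simp [hep]
        · simp only [hep, if_false]
          by_cases helt : e < d1
          · exact hd1min e he1 helt
          · have hef : e = d1 + (e - d1) := by ring
            have hf1 : 1 ≤ e - d1 := by
              rcases lt_or_eq_of_le (le_of_not_gt helt) with hlt | heq
              · omega
              · exfalso; exact hep (by rw [← heq]; exact hcase)
            unfold pvHit
            rw [← hn, hef, ← hstep]
            rw [hcase]
            have := hd2min (e - d1) hf1 (by omega)
            unfold pvHit at this
            rw [← hn] at this
            exact this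
    rw [hn] at hcase
    rw [hscan', htgt, ← hd2sc, hd1sc, if_pos hcase]
  · -- j's neighbour survives: nothing changes
    have hscan' : pvScan alive' j δ = (j + δ * d1) % n := by
      rw [← hlen']
      apply pvScan_eq_of_least alive' j δ d1 hpos' hd11 (by rw [hlen']; omega)
      · rw [hhit' d1]
        simp only [hcase, if_false]
        unfold pvHit
        rw [← hn]
        exact hd1h
      · intro e he1 he2
        rw [hhit' e]
        by_cases hep : (j + δ * e) % n = p
        · simp [hep]
        · simp only [hep, if_false]
          exact hd1min e he1 he2
    rw [hn] at hcase
    rw [hscan', hd1sc, if_neg hcase, hn]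

lemma pv_set_set_cancel (alive : List Bool) (v : Int) (hv0 : 0 ≤ v)
    (hvn : v < (alive.length : Int)) (hva : pvAliveAt alive v = false) :
    (alive.set v.toNat true).set v.toNat false = alive := by
  rw [List.set_set]
  apply List.ext_getElem?
  intro m
  rw [List.getElem?_set]
  by_cases hm : v.toNat = m
  · subst hm
    have hlt : v.toNat < alive.length := by omega
    simp only [hlt, if_true, if_pos rfl]
    unfold pvAliveAt at hva
    have := List.getElem?_eq_getElem hlt (l := alive)
    rw [this] at hva ⊢
    simp at hva
    simp [hva]
  · simp [hm]

lemma pvScan_ins (alive : List Bool) (p j δ : Int) (hδ : δ = 1 ∨ δ = -1) (h : 0 < alive.length)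
    (hp0 : 0 ≤ p) (hpn : p < (alive.length : Int)) (hpa : pvAliveAt alive p = false)
    (hj0 : 0 ≤ j) (hjn : j < (alive.length : Int)) (hja : pvAliveAt alive j = true) :
    pvScan (alive.set p.toNat true) j δ =
      if j = pvScan (alive.set p.toNat true) p (-δ) then p else pvScan alive j δ := by
  have hnpos : (0:Int) < (alive.length : Int) := by exact_mod_cast h
  set alive' : List Bool := alive.set p.toNat true with ha'
  have hlen : alive'.length = alive.length := by simp [ha']
  have hlen' : (alive'.length : Int) = (alive.length : Int) := by rw [hlen]
  have hpos' : 0 < alive'.length := by omega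
  have hjp : j ≠ p := by
    intro hc
    rw [hc] at hja
    rw [hja] at hpa
    exact Bool.true_eq_false.mp hpa
  have hpa' : pvAliveAt alive' p = true := by
    rw [ha', pvAliveAt_set alive p p true hp0 hp0 hpn, if_pos rfl]
  have hja' : pvAliveAt alive' j = true := by
    rw [ha', pvAliveAt_set alive p j true hp0 hj0 hjn, if_neg hjp]
    exact hja
  have hδ' : -δ = 1 ∨ -δ = -1 := by rcases hδ with h1 | h1 <;> subst h1 <;> simp
  have hdel := pvScan_del alive' p j δ hδ hpos' hp0 (by rw [hlen']; exact hpn) hpa'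
    hj0 (by rw [hlen']; exact hjn) hja' hjp
  rw [ha'] at hdel
  rw [pv_set_set_cancel alive p hp0 hpn hpa] at hdel
  rw [← ha'] at hdel
  by_cases hc : j = pvScan alive' p (-δ)
  · rw [if_pos hc]
    have hinv := pvScan_inv alive' p j (-δ) hδ' hpos'
      hp0 (by rw [hlen']; exact hpn) hpa'
      hj0 (by rw [hlen']; exact hjn) hja' hc.symm
    rw [neg_neg] at hinv
    exact hinv
  · rw [if_neg hc]
    have hne : pvScan alive' j δ ≠ p := by
      intro hcc
      have hinv := pvScan_inv alive' j p δ hδ hpos'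
        hj0 (by rw [hlen']; exact hjn) hja'
        hp0 (by rw [hlen']; exact hpn) hpa' hcc
      exact hc hinv.symm
    rw [if_neg hne] at hdel
    exact hdel.symm

lemma pvAliveAt_replicate (m : Nat) (t : Int) (ht0 : 0 ≤ t) (htn : t < (m : Int)) :
    pvAliveAt (List.replicate m true) t = true := by
  unfold pvAliveAt
  have : t.toNat < m := by omega
  simp [List.getElem?_replicate, this]

lemma pvScan_replicate (m : Nat) (h : 0 < m) (i δ : Int) :
    pvScan (List.replicate m true) i δ = (i + δ) % (m : Int) := by
  have hlen : (List.replicate m true).length = m := by simp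
  have h1 : pvScan (List.replicate m true) i δ =
      (i + δ * 1) % ((List.replicate m true).length : Int) := by
    apply pvScan_eq_of_least _ i δ 1 (by rw [hlen]; exact h) (le_refl 1) (by rw [hlen]; exact_mod_cast h)
    · unfold pvHit
      apply pvAliveAt_replicate <;> rw [hlen]
      · exact Int.emod_nonneg _ (by exact_mod_cast h.ne')
      · exact Int.emod_lt_of_pos _ (by exact_mod_cast h)
    · intro e he1 he2
      omega
  rw [h1, hlen]
  ring_nf

-- existence of an alive row from a positive count
lemma pv_exists_alive (alive : List Bool) (h : 0 < alive.count true) :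
    ∃ t : Int, 0 ≤ t ∧ t < (alive.length : Int) ∧ pvAliveAt alive t = true := by
  have hmem : true ∈ alive := List.count_pos_iff.mp h
  obtain ⟨m, hm, hv⟩ := List.mem_iff_getElem.mp hmem
  refine ⟨(m : Int), by omega, by exact_mod_cast hm, ?_⟩
  unfold pvAliveAt
  simp only [Int.toNat_natCast]
  rw [List.getElem?_eq_getElem hm, hv]
  rfl

lemma pv_count_set_false (alive : List Bool) (p : Int) (hp0 : 0 ≤ p)
    (hpn : p < (alive.length : Int)) (hpa : pvAliveAt alive p = true) :
    (alive.set p.toNat false).count true = alive.count true - 1 := by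
  have hlt : p.toNat < alive.length := by omega
  have hget : alive[p.toNat] = true := by
    unfold pvAliveAt at hpa
    rw [List.getElem?_eq_getElem hlt] at hpa
    simpa using hpa
  rw [List.count_set hlt]
  simp [hget]

lemma pv_count_set_true (alive : List Bool) (p : Int) (hp0 : 0 ≤ p)
    (hpn : p < (alive.length : Int)) (hpa : pvAliveAt alive p = false) :
    (alive.set p.toNat true).count true = alive.count true + 1 := by
  have hlt : p.toNat < alive.length := by omega
  have hget : alive[p.toNat] = false := by
    unfold pvAliveAt at hpa
    rw [List.getElem?_eq_getElem hlt] at hpa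
    simpa using hpa
  rw [List.count_set hlt]
  simp [hget]

-- dict lemmas not provided by the prelude: get?/contains after erase
lemma pvDict_get?_erase (d : PySem.Dict Int (List Int)) (k k' : Int) :
    (d.erase k).get? k' = if k' = k then none else d.get? k' := by
  simp only [PySem.Dict.erase, PySem.Dict.get?, List.find?_filter]
  by_cases hk : k' = k
  · subst hk
    rw [List.find?_eq_none.mpr]
    · simp
    · intro x _
      simp only [Bool.not_eq_true']
      by_cases hx : x.1 == k' <;> simp [hx]
  · rw [if_neg hk]
    have hfun : (fun (a : Int × List Int) => decide ((!(a.1 == k)) = true ∧ (a.1 == k') = true)) =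
        (fun (a : Int × List Int) => a.1 == k') := by
      funext x
      by_cases hx : x.1 == k'
      · have hx' : x.1 = k' := by simpa using hx
        have hxk : (x.1 == k) = false := by simp [hx', hk]
        simp [hx, hxk]
      · simp [hx]
    rw [hfun]

lemma pvDict_get?_modify (d : PySem.Dict Int (List Int)) (k k' : Int) (d0 : List Int)
    (f : List Int → List Int) :
    (d.modify k d0 f).get? k' = if k' = k then some (f (d.getD k d0)) else d.get? k' := by
  simp only [PySem.Dict.modify]
  by_cases hk : k' = k
  · subst hk
    rw [if_pos rfl, PySem.Dict.get?_insert_self]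
  · rw [if_neg hk, PySem.Dict.get?_insert_of_ne _ _ hk]

lemma pv_exists_hit (alive : List Bool) (i δ : Int) (hδ : δ = 1 ∨ δ = -1) (h : 0 < alive.length)
    (t : Int) (ht0 : 0 ≤ t) (htn : t < (alive.length : Int)) :
    ∃ d : Int, 1 ≤ d ∧ d ≤ (alive.length : Int) ∧
      (i + δ * d) % (alive.length : Int) = t := by
  have hnpos : (0:Int) < (alive.length : Int) := by exact_mod_cast h
  set n : Int := (alive.length : Int) with hn
  by_cases hr0' : (δ * (t - i)) % n = 0
  · refine ⟨n, by omega, le_refl n, ?_⟩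
    have hdvd : n ∣ δ * (t - i) := Int.dvd_of_emod_eq_zero hr0'
    have hdvd' : n ∣ (i - t) := by
      rcases hδ with h1 | h1 <;> subst h1
      · have h2 : n ∣ (t - i) := by simpa using hdvd
        have h3 := Int.dvd_neg.mpr h2
        simpa [neg_sub] using h3
      · simpa using hdvd
    have e1 : i + δ * n = i + n * δ := by ring
    rw [e1, Int.add_mul_emod_self_left]
    have : (i - t) % n = 0 := Int.emod_eq_zero_of_dvd hdvd'
    have e2 : i % n = t % n := Int.emod_eq_emod_iff_emod_sub_eq_zero.mpr this
    rw [e2, Int.emod_eq_of_lt ht0 htn]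
  · set r : Int := (δ * (t - i)) % n with hr
    have hr0 : 0 ≤ r := Int.emod_nonneg _ (by omega)
    have hrn : r < n := Int.emod_lt_of_pos _ hnpos
    refine ⟨r, by omega, by omega, ?_⟩
    have hdm : δ * (t - i) = n * (δ * (t - i) / n) + r := by
      rw [hr, Int.emod_def]; ring
    have e1 : i + δ * r = t + n * (-(δ * (δ * (t - i) / n))) := by
      rcases hδ with h1 | h1 <;> subst h1 <;> nlinarith [hdm]
    rw [e1, Int.add_mul_emod_self_left, Int.emod_eq_of_lt ht0 htn]

lemma pvScan_ne_self (alive : List Bool) (i δ : Int) (hδ : δ = 1 ∨ δ = -1) (h : 0 < alive.length)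
    (hi0 : 0 ≤ i) (hin : i < (alive.length : Int)) (hia : pvAliveAt alive i = true)
    (t : Int) (ht0 : 0 ≤ t) (htn : t < (alive.length : Int)) (hta : pvAliveAt alive t = true)
    (hti : t ≠ i) : pvScan alive i δ ≠ i := by
  have hnpos : (0:Int) < (alive.length : Int) := by exact_mod_cast h
  set n : Int := (alive.length : Int) with hn
  intro hc
  obtain ⟨d₀, hd1, hdn, hdh, hdmin, hdsc⟩ := pvScan_spec alive i δ hδ h i hi0 hin hia
  have hin' : (i + δ * n) % n = i := by
    have e1 : i + δ * n = i + n * δ := by ring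
    rw [e1, Int.add_mul_emod_self_left, Int.emod_eq_of_lt hi0 hin]
  have hd0n : d₀ = n := by
    apply pvHit_target_inj alive i δ hδ h d₀ n hd1 hdn (by omega) (le_refl n)
    rw [← hdsc, hc, ← hn, hin']
  obtain ⟨e, he1, he2, het⟩ := pv_exists_hit alive i δ hδ h t ht0 htn
  have hee : e < n := by
    rcases lt_or_eq_of_le he2 with hlt | heq
    · exact hlt
    · exfalso; apply hti; rw [← het, ← hn, heq, hin']
  have hmiss := hdmin e he1 (by omega)
  have : pvHit alive i δ e = true := by
    unfold pvHit
    rw [← hn, het]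
    exact hta
  rw [this] at hmiss
  exact Bool.true_eq_false.mp hmiss

lemma pv_set_same (alive : List Bool) (v : Int) (b : Bool) (hv0 : 0 ≤ v)
    (hvn : v < (alive.length : Int)) (hva : pvAliveAt alive v = b) :
    alive.set v.toNat b = alive := by
  apply List.ext_getElem?
  intro m
  rw [List.getElem?_set]
  by_cases hm : v.toNat = m
  · subst hm
    have hlt : v.toNat < alive.length := by omega
    simp only [hlt, if_true, if_pos rfl]
    unfold pvAliveAt at hva
    rw [List.getElem?_eq_getElem hlt] at hva ⊢
    simp at hva
    simp [hva]
  · simp [hm]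


-- stack correspondence: entries top-last; stated on the REVERSED lists (top first)
def pvStkInv : List Bool → List (Int × List Int) → List Int → Prop
  | _, [], [] => True
  | alive, (v, ln) :: ds, w :: ws =>
      v = w ∧ 0 ≤ v ∧ v < (alive.length : Int) ∧ pvAliveAt alive v = false ∧
      ln = [pvScan (alive.set v.toNat true) v (-1), pvScan (alive.set v.toNat true) v 1] ∧
      pvStkInv (alive.set v.toNat true) ds ws
  | _, _, _ => False

-- the simulation invariant between A's state and B's state
structure pvInv (n : Int) (linked : PySem.Dict Int (List Int)) (deleted : List (Int × List Int))
    (p : Int) (alive : List Bool) (stack : List Int) (q : Int) : Prop where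
  hn2 : 2 ≤ n
  hlen : (alive.length : Int) = n
  hpq : p = q
  hp0 : 0 ≤ p
  hpn : p < n
  hpa : pvAliveAt alive p = true
  hget : ∀ j : Int, 0 ≤ j → j < n → pvAliveAt alive j = true →
      linked.get? j = some [pvScan alive j (-1), pvScan alive j 1]
  hnone : ∀ j : Int, 0 ≤ j → j < n → pvAliveAt alive j = false → linked.get? j = none
  hstk : pvStkInv alive deleted.reverse stack.reverse
  hcnt : (alive.count true : Int) + stack.length = n
  hdlen : deleted.length = stack.length

lemma pvGet2_zero (a b : Int) : (PySem.List.pyGet? [a, b] (0 : Int)).getD 0 = a := rfl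
lemma pvGet2_one (a b : Int) : (PySem.List.pyGet? [a, b] (1 : Int)).getD 0 = b := rfl

lemma pvHop_eq (n : Int) (linked : PySem.Dict Int (List Int)) (alive : List Bool)
    (hlen : (alive.length : Int) = n) (hn2 : 2 ≤ n)
    (hget : ∀ j : Int, 0 ≤ j → j < n → pvAliveAt alive j = true →
      linked.get? j = some [pvScan alive j (-1), pvScan alive j 1])
    (iIdx δ : Int) (hiδ : (iIdx = 0 ∧ δ = -1) ∨ (iIdx = 1 ∧ δ = 1)) :
    ∀ (m : Nat) (p : Int), 0 ≤ p → p < n → pvAliveAt alive p = true →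
      pvHopA linked iIdx m p = pvRepScan alive δ m p ∧ 0 ≤ pvHopA linked iIdx m p ∧
        pvHopA linked iIdx m p < n ∧ pvAliveAt alive (pvHopA linked iIdx m p) = true := by
  have hpos : 0 < alive.length := by omega
  have hδ : δ = 1 ∨ δ = -1 := by rcases hiδ with ⟨_, h1⟩ | ⟨_, h1⟩ <;> omega
  intro m
  induction m with
  | zero => intro p hp0 hpn hpa; exact ⟨rfl, hp0, hpn, hpa⟩
  | succ m ih =>
    intro p hp0 hpn hpa
    have hfol : pvFollow linked iIdx p = pvScan alive p δ := by
      unfold pvFollow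
      rw [hget p hp0 hpn hpa]
      rcases hiδ with ⟨hi, hd⟩ | ⟨hi, hd⟩ <;> subst hi <;> subst hd
      · exact pvGet2_zero _ _
      · exact pvGet2_one _ _
    have hval := pvScan_valid alive p δ hδ hpos p hp0 (by omega) hpa
    have hstep : pvHopA linked iIdx (m + 1) p = pvHopA linked iIdx m (pvScan alive p δ) := by
      show pvHopA linked iIdx m (pvFollow linked iIdx p) = _
      rw [hfol]
    have hstepB : pvRepScan alive δ (m + 1) p = pvRepScan alive δ m (pvScan alive p δ) := rfl
    rw [hstep, hstepB]
    exact ih (pvScan alive p δ) hval.1 (by omega) hval.2.2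

lemma pvScan_eq_iff (alive : List Bool) (p j δ : Int) (hδ : δ = 1 ∨ δ = -1) (h : 0 < alive.length)
    (hp0 : 0 ≤ p) (hpn : p < (alive.length : Int)) (hpa : pvAliveAt alive p = true)
    (hj0 : 0 ≤ j) (hjn : j < (alive.length : Int)) (hja : pvAliveAt alive j = true) :
    pvScan alive j δ = p ↔ pvScan alive p (-δ) = j := by
  have hδ' : -δ = 1 ∨ -δ = -1 := by rcases hδ with h1 | h1 <;> subst h1 <;> simp
  constructor
  · intro hc
    exact pvScan_inv alive j p δ hδ h hj0 hjn hja hp0 hpn hpa hc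
  · intro hc
    have := pvScan_inv alive p j (-δ) hδ' h hp0 hpn hpa hj0 hjn hja hc
    rwa [neg_neg] at this

lemma pvSet2_zero (a b c : Int) : List.set [a, b] 0 c = [c, b] := rfl
lemma pvSet2_one (a b c : Int) : List.set [a, b] 1 c = [a, c] := rfl

lemma pvInv_C (n : Int) (linked : PySem.Dict Int (List Int)) (deleted : List (Int × List Int))
    (p : Int) (alive : List Bool) (stack : List Int) (q : Int)
    (hinv : pvInv n linked deleted p alive stack q)
    (hroom : (stack.length : Int) + 1 ≤ n - 1) :
    pvInv n
      (PySem.Dict.erase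
        (PySem.Dict.modify
          (PySem.Dict.modify linked (pvScan alive p (-1)) [] (fun l => l.set 1 (pvScan alive p 1)))
          (pvScan alive p 1) [] (fun l => l.set 0 (pvScan alive p (-1))))
        p)
      (deleted ++ [(p, [pvScan alive p (-1), pvScan alive p 1])])
      (if pvScan alive p 1 = 0 then pvScan alive p (-1) else pvScan alive p 1)
      (alive.set p.toNat false)
      (stack ++ [q])
      (if pvScan alive p 1 = 0 then pvScan alive p (-1) else pvScan alive p 1) := by
  obtain ⟨hn2, hlen, hpq, hp0, hpn, hpa, hget, hnone, hstk, hcnt, hdlen⟩ := hinv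
  have hpos : 0 < alive.length := by omega
  set sm0 : Int := pvScan alive p (-1) with hsm
  set sp0 : Int := pvScan alive p 1 with hsp
  set alive' : List Bool := alive.set p.toNat false with ha'
  have hlen' : (alive'.length : Int) = n := by rw [ha']; simp [hlen]
  have hpos' : 0 < alive'.length := by omega
  -- at least one other alive row
  have hcnt2 : 2 ≤ alive.count true := by omega
  have hcnt1' : 0 < alive'.count true := by
    rw [ha', pv_count_set_false alive p hp0 (by omega) hpa]; omega
  obtain ⟨t, ht0, htn', hta'⟩ := pv_exists_alive alive' hcnt1'
  have htn : t < n := by omega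
  have htp : t ≠ p := by
    intro hc
    rw [ha', pvAliveAt_set alive p t false hp0 ht0 (by omega), if_pos hc] at hta'
    simp at hta'
  have hta : pvAliveAt alive t = true := by
    rw [ha', pvAliveAt_set alive p t false hp0 ht0 (by omega), if_neg htp] at hta'
    exact hta'
  -- the two neighbours of p are alive, in range and different from p
  have hvm := pvScan_valid alive p (-1) (by simp) hpos p hp0 (by omega) hpa
  have hvp := pvScan_valid alive p 1 (by simp) hpos p hp0 (by omega) hpa
  have hsmne : sm0 ≠ p := pvScan_ne_self alive p (-1) (by simp) hpos hp0 (by omega) hpa t ht0 (by omega) hta htp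
  have hspne : sp0 ≠ p := pvScan_ne_self alive p 1 (by simp) hpos hp0 (by omega) hpa t ht0 (by omega) hta htp
  -- neighbour relations
  have hsmp : pvScan alive sm0 1 = p := by
    rw [pvScan_eq_iff alive p sm0 1 (by simp) hpos hp0 (by omega) hpa hvm.1 hvm.2.1 hvm.2.2]
  have hspp : pvScan alive sp0 (-1) = p := by
    rw [pvScan_eq_iff alive p sp0 (-1) (by simp) hpos hp0 (by omega) hpa hvp.1 hvp.2.1 hvp.2.2]
    simp [hsp.symm]
  have haset : alive'.set p.toNat true = alive := by
    rw [ha', List.set_set]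
    exact pv_set_same alive p true hp0 (by omega) hpa
  have haliveAt' : ∀ j : Int, 0 ≤ j → j < n → pvAliveAt alive' j = (if j = p then false else pvAliveAt alive j) := by
    intro j hj0 hjn
    rw [ha', pvAliveAt_set alive p j false hp0 hj0 (by omega)]
  -- new pointer is alive and in range
  have hptr0 : 0 ≤ (if sp0 = 0 then sm0 else sp0) := by split_ifs; exacts [hvm.1, hvp.1]
  have hptrn : (if sp0 = 0 then sm0 else sp0) < n := by
    split_ifs
    · omega
    · omega
  have hptra : pvAliveAt alive' (if sp0 = 0 then sm0 else sp0) = true := by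
    split_ifs with hz
    · rw [haliveAt' sm0 hvm.1 (by omega), if_neg hsmne]; exact hvm.2.2
    · rw [haliveAt' sp0 hvp.1 (by omega), if_neg hspne]; exact hvp.2.2
  refine ⟨hn2, hlen', rfl, hptr0, hptrn, hptra, ?_, ?_, ?_, ?_, ?_⟩
  · -- hget
    intro j hj0 hjn hja'
    have hjp : j ≠ p := by
      intro hc
      rw [haliveAt' j hj0 hjn, if_pos hc] at hja'
      simp at hja'
    have hja : pvAliveAt alive j = true := by
      rw [haliveAt' j hj0 hjn, if_neg hjp] at hja'
      exact hja'
    have hdelm := pvScan_del alive p j (-1) (by simp) hpos hp0 (by omega) hpa hj0 (by omega) hja hjp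
    have hdelp := pvScan_del alive p j 1 (by simp) hpos hp0 (by omega) hpa hj0 (by omega) hja hjp
    rw [← ha'] at hdelm hdelp
    have hiffp : pvScan alive j 1 = p ↔ j = sm0 := by
      rw [pvScan_eq_iff alive p j 1 (by simp) hpos hp0 (by omega) hpa hj0 (by omega) hja]
      constructor
      · intro hh; rw [← hh]
      · intro hh; rw [hh, hsm]
    have hiffm : pvScan alive j (-1) = p ↔ j = sp0 := by
      rw [pvScan_eq_iff alive p j (-1) (by simp) hpos hp0 (by omega) hpa hj0 (by omega) hja]
      constructor
      · intro hh; rw [← hh]; simp [hsp]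
      · intro hh; rw [hh, hsp]; simp
    have hgl : ∀ x : Int, 0 ≤ x → x < n → pvAliveAt alive x = true →
        PySem.Dict.getD linked x [] = [pvScan alive x (-1), pvScan alive x 1] := by
      intro x h1 h2 h3
      rw [PySem.Dict.getD_eq_get?_getD, hget x h1 h2 h3]
      rfl
    rw [pvDict_get?_erase, if_neg hjp, pvDict_get?_modify, pvDict_get?_modify]
    by_cases hjsp : j = sp0
    · rw [if_pos hjsp, PySem.Dict.getD_modify]
      by_cases hss : sp0 = sm0
      · -- j = sp0 = sm0 : the sole other alive row
        rw [if_pos hss, hgl sm0 hvm.1 (by omega) hvm.2.2, pvSet2_one, pvSet2_zero]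
        rw [hdelm, hdelp, if_pos (hiffm.mpr hjsp), if_pos (hiffp.mpr (by rw [hjsp, hss]))]
      · rw [if_neg hss, hgl sp0 hvp.1 (by omega) hvp.2.2, pvSet2_zero]
        rw [hdelm, hdelp, if_pos (hiffm.mpr hjsp),
          if_neg (fun hc => hss (by rw [← hjsp, hiffp.mp hc]))]
        rw [hjsp]
    · rw [if_neg hjsp]
      by_cases hjsm : j = sm0
      · rw [if_pos hjsm, hgl sm0 hvm.1 (by omega) hvm.2.2, pvSet2_one]
        rw [hdelm, hdelp, if_neg (fun hc => hjsp (hiffm.mp hc)), if_pos (hiffp.mpr hjsm)]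
        rw [hjsm]
      · rw [if_neg hjsm, hget j hj0 hjn hja]
        rw [hdelm, hdelp, if_neg (fun hc => hjsp (hiffm.mp hc)),
          if_neg (fun hc => hjsm (hiffp.mp hc))]
  · -- hnone
    intro j hj0 hjn hjd
    rw [pvDict_get?_erase]
    by_cases hjp : j = p
    · rw [if_pos hjp]
    · rw [if_neg hjp]
      have hjd0 : pvAliveAt alive j = false := by
        rw [haliveAt' j hj0 hjn, if_neg hjp] at hjd
        exact hjd
      have hjsm : j ≠ sm0 := by
        intro hc
        rw [hc, hvm.2.2] at hjd0
        simp at hjd0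
      have hjsp : j ≠ sp0 := by
        intro hc
        rw [hc, hvp.2.2] at hjd0
        simp at hjd0
      rw [pvDict_get?_modify, if_neg hjsp, pvDict_get?_modify, if_neg hjsm]
      exact hnone j hj0 hjn hjd0
  · -- hstk
    simp only [List.reverse_append, List.reverse_cons, List.reverse_nil, List.nil_append,
      List.singleton_append]
    show pvStkInv alive' ((p, [sm0, sp0]) :: deleted.reverse) (q :: stack.reverse)
    refine ⟨hpq, hp0, by omega, ?_, ?_, ?_⟩
    · rw [haliveAt' p hp0 hpn, if_pos rfl]
    · rw [haset]
    · rw [haset]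
      exact hstk
  · -- hcnt
    rw [ha', pv_count_set_false alive p hp0 (by omega) hpa]
    simp only [List.length_append, List.length_cons, List.length_nil]
    push_cast
    omega
  · -- hdlen
    simp [hdlen]

lemma pvInv_Z (n : Int) (linked : PySem.Dict Int (List Int)) (deleted : List (Int × List Int))
    (p : Int) (alive : List Bool) (stack : List Int) (q : Int)
    (hinv : pvInv n linked deleted p alive stack q)
    (v : Int) (ln : List Int) (ds : List (Int × List Int)) (ws : List Int)
    (hd : deleted.reverse = (v, ln) :: ds) (hs : stack.reverse = v :: ws) :
    pvInv n
      (PySem.Dict.modify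
        (PySem.Dict.modify (PySem.Dict.insert linked v ln)
          ((PySem.List.pyGet? ln 0).getD 0) [] (fun l => l.set 1 v))
        ((PySem.List.pyGet? ln 1).getD 0) [] (fun l => l.set 0 v))
      ds.reverse p (alive.set v.toNat true) ws.reverse q := by
  obtain ⟨hn2, hlen, hpq, hp0, hpn, hpa, hget, hnone, hstk, hcnt, hdlen⟩ := hinv
  have hpos : 0 < alive.length := by omega
  rw [hd, hs] at hstk
  obtain ⟨_, hv0, hvn, hvdead, hln, htail⟩ := hstk
  set aliveP : List Bool := alive.set v.toNat true with haP
  have hlenP : (aliveP.length : Int) = n := by rw [haP]; simp [hlen]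
  have hposP : 0 < aliveP.length := by omega
  have hvn' : v < n := by omega
  have haAt : ∀ j : Int, 0 ≤ j → j < n → pvAliveAt aliveP j = (if j = v then true else pvAliveAt alive j) := by
    intro j hj0 hjn
    rw [haP, pvAliveAt_set alive v j true hv0 hj0 (by omega)]
  have hpv : p ≠ v := by
    intro hc
    rw [hc, hvdead] at hpa
    simp at hpa
  have hpaP : pvAliveAt aliveP p = true := by
    rw [haAt p hp0 hpn, if_neg hpv]; exact hpa
  have hvaP : pvAliveAt aliveP v = true := by
    rw [haAt v hv0 hvn', if_pos rfl]
  set pv : Int := pvScan aliveP v (-1) with hpv'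
  set nv : Int := pvScan aliveP v 1 with hnv'
  have hlnv : ln = [pv, nv] := hln
  have hvm := pvScan_valid aliveP v (-1) (by simp) hposP v hv0 (by omega) hvaP
  have hvp := pvScan_valid aliveP v 1 (by simp) hposP v hv0 (by omega) hvaP
  have hpvne : pv ≠ v := pvScan_ne_self aliveP v (-1) (by simp) hposP hv0 (by omega) hvaP
    p hp0 (by omega) hpaP hpv
  have hnvne : nv ≠ v := pvScan_ne_self aliveP v 1 (by simp) hposP hv0 (by omega) hvaP
    p hp0 (by omega) hpaP hpv
  have hg0 : (PySem.List.pyGet? ln 0).getD 0 = pv := by rw [hlnv]; exact pvGet2_zero _ _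
  have hg1 : (PySem.List.pyGet? ln 1).getD 0 = nv := by rw [hlnv]; exact pvGet2_one _ _
  rw [hg0, hg1]
  -- alive values of pv/nv in the OLD array
  have hpva : pvAliveAt alive pv = true := by
    have := hvm.2.2
    rw [haAt pv hvm.1 (by omega), if_neg hpvne] at this
    exact this
  have hnva : pvAliveAt alive nv = true := by
    have := hvp.2.2
    rw [haAt nv hvp.1 (by omega), if_neg hnvne] at this
    exact this
  refine ⟨hn2, hlenP, hpq, hp0, hpn, hpaP, ?_, ?_, ?_, ?_, ?_⟩
  · -- hget
    intro j hj0 hjn hjaP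
    rw [pvDict_get?_modify, pvDict_get?_modify]
    by_cases hjv : j = v
    · rw [if_neg (by rw [hjv]; exact fun hc => hnvne hc.symm),
        if_neg (by rw [hjv]; exact fun hc => hpvne hc.symm), hjv,
        PySem.Dict.get?_insert_self, hlnv]
    · have hja : pvAliveAt alive j = true := by
        rw [haAt j hj0 hjn, if_neg hjv] at hjaP
        exact hjaP
      have hinsm := pvScan_ins alive v j (-1) (by simp) hpos hv0 (by omega) hvdead hj0 (by omega) hja
      have hinsp := pvScan_ins alive v j 1 (by simp) hpos hv0 (by omega) hvdead hj0 (by omega) hja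
      rw [← haP] at hinsm hinsp
      have hem : pvScan aliveP v (-(-1)) = nv := by rw [hnv']; norm_num
      have hep : pvScan aliveP v (-1) = pv := rfl
      rw [hem] at hinsm
      rw [hep] at hinsp
      have hgl : ∀ x : Int, 0 ≤ x → x < n → pvAliveAt alive x = true → x ≠ v →
          PySem.Dict.getD (PySem.Dict.insert linked v ln) x [] = [pvScan alive x (-1), pvScan alive x 1] := by
        intro x h1 h2 h3 h4
        rw [PySem.Dict.getD_eq_get?_getD, PySem.Dict.get?_insert_of_ne _ _ h4, hget x h1 h2 h3]
        rfl
      by_cases hjn' : j = nv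
      · rw [if_pos hjn', PySem.Dict.getD_modify]
        by_cases hnp : nv = pv
        · rw [if_pos hnp, hgl pv hvm.1 (by omega) hpva hpvne, pvSet2_one, pvSet2_zero,
            hinsm, hinsp, if_pos hjn', if_pos (by rw [hjn']; exact hnp)]
        · rw [if_neg hnp, hgl nv hvp.1 (by omega) hnva hnvne, pvSet2_zero,
            hinsm, hinsp, if_pos hjn', if_neg (by rw [hjn']; exact hnp)]
          rw [hjn']
      · rw [if_neg hjn']
        by_cases hjp' : j = pv
        · rw [if_pos hjp', hgl pv hvm.1 (by omega) hpva hpvne, pvSet2_one,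
            hinsm, hinsp, if_neg hjn', if_pos hjp']
          rw [hjp']
        · rw [if_neg hjp', PySem.Dict.get?_insert_of_ne _ _ hjv, hget j hj0 hjn hja,
            hinsm, hinsp, if_neg hjn', if_neg hjp']
  · -- hnone
    intro j hj0 hjn hjdP
    have hjv : j ≠ v := by
      intro hc
      rw [haAt j hj0 hjn, if_pos hc] at hjdP
      simp at hjdP
    have hjd : pvAliveAt alive j = false := by
      rw [haAt j hj0 hjn, if_neg hjv] at hjdP
      exact hjdP
    have hjpv : j ≠ pv := by
      intro hc
      rw [hc, hpva] at hjd
      simp at hjd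
    have hjnv : j ≠ nv := by
      intro hc
      rw [hc, hnva] at hjd
      simp at hjd
    rw [pvDict_get?_modify, if_neg hjnv, pvDict_get?_modify, if_neg hjpv,
      PySem.Dict.get?_insert_of_ne _ _ hjv]
    exact hnone j hj0 hjn hjd
  · -- hstk
    rw [List.reverse_reverse, List.reverse_reverse]
    exact htail
  · -- hcnt
    rw [haP, pv_count_set_true alive v hv0 (by omega) hvdead]
    have h1 : stack.length = ws.length + 1 := by
      have := congrArg List.length hs
      simpa using this
    have h2 : (ws.reverse).length = ws.length := by simp
    rw [h2]
    push_cast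
    push_cast at hcnt
    omega
  · -- hdlen
    have h1 : deleted.length = ds.length + 1 := by
      have := congrArg List.length hd
      simpa using this
    have h2 : stack.length = ws.length + 1 := by
      have := congrArg List.length hs
      simpa using this
    simp
    omega

lemma pvStepA_def (st : PySem.Dict Int (List Int) × List (Int × List Int) × Int) (c : String) :
    pvStepA st c =
      if pvOp c = "U" then (st.1, st.2.1, pvHopA st.1 0 (pvXval c).toNat st.2.2)
      else if pvOp c = "D" then (st.1, st.2.1, pvHopA st.1 1 (pvXval c).toNat st.2.2)
      else if pvOp c = "C" then
        (PySem.Dict.erase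
          (PySem.Dict.modify
            (PySem.Dict.modify st.1
              ((PySem.List.pyGet? ((PySem.Dict.get? st.1 st.2.2).getD []) 0).getD 0) []
              (fun l => l.set 1 ((PySem.List.pyGet? ((PySem.Dict.get? st.1 st.2.2).getD []) 1).getD 0)))
            ((PySem.List.pyGet? ((PySem.Dict.get? st.1 st.2.2).getD []) 1).getD 0) []
            (fun l => l.set 0 ((PySem.List.pyGet? ((PySem.Dict.get? st.1 st.2.2).getD []) 0).getD 0)))
          st.2.2,
         st.2.1 ++ [(st.2.2, [((PySem.List.pyGet? ((PySem.Dict.get? st.1 st.2.2).getD []) 0).getD 0),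
            ((PySem.List.pyGet? ((PySem.Dict.get? st.1 st.2.2).getD []) 1).getD 0)])],
         if ((PySem.List.pyGet? ((PySem.Dict.get? st.1 st.2.2).getD []) 1).getD 0) = 0
         then ((PySem.List.pyGet? ((PySem.Dict.get? st.1 st.2.2).getD []) 0).getD 0)
         else ((PySem.List.pyGet? ((PySem.Dict.get? st.1 st.2.2).getD []) 1).getD 0))
      else if pvOp c = "Z" then
        match PySem.List.pop? st.2.1 with
        | none => (st.1, st.2.1, st.2.2)
        | some ((node, ln), rest) =>
          (PySem.Dict.modify
            (PySem.Dict.modify (PySem.Dict.insert st.1 node ln)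
              ((PySem.List.pyGet? ln 0).getD 0) [] (fun l => l.set 1 node))
            ((PySem.List.pyGet? ln 1).getD 0) [] (fun l => l.set 0 node),
           rest, st.2.2)
      else (st.1, st.2.1, st.2.2) := rfl

lemma pvStepB_def (st : List Bool × List Int × Int) (c : String) :
    pvStepB st c =
      if pvOp c = "U" then (st.1, st.2.1, pvRepScan st.1 (-1) (pvXval c).toNat st.2.2)
      else if pvOp c = "D" then (st.1, st.2.1, pvRepScan st.1 1 (pvXval c).toNat st.2.2)
      else if pvOp c = "C" then
        (PySem.List.pySetD st.1 st.2.2 false, st.2.1 ++ [st.2.2],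
         if pvScan st.1 st.2.2 1 = 0 then pvScan st.1 st.2.2 (-1) else pvScan st.1 st.2.2 1)
      else if pvOp c = "Z" then
        match PySem.List.pop? st.2.1 with
        | none => (st.1, st.2.1, st.2.2)
        | some (v, rest) => (PySem.List.pySetD st.1 v true, rest, st.2.2)
      else (st.1, st.2.1, st.2.2) := rfl

lemma pvStep_inv (n : Int) (c : String)
    (linked : PySem.Dict Int (List Int)) (deleted : List (Int × List Int)) (p : Int)
    (alive : List Bool) (stack : List Int) (q : Int)
    (hinv : pvInv n linked deleted p alive stack q)
    (hC : pvOp c = "C" → (stack.length : Int) + 1 ≤ n - 1)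
    (hZ : pvOp c = "Z" → 1 ≤ stack.length) :
    pvInv n (pvStepA (linked, deleted, p) c).1 (pvStepA (linked, deleted, p) c).2.1
      (pvStepA (linked, deleted, p) c).2.2
      (pvStepB (alive, stack, q) c).1 (pvStepB (alive, stack, q) c).2.1
      (pvStepB (alive, stack, q) c).2.2 ∧
    ((pvStepB (alive, stack, q) c).2.1.length : Int) =
      (stack.length : Int) + (if pvOp c = "C" then 1 else 0) - (if pvOp c = "Z" then 1 else 0) := by
  have hF := hinv
  obtain ⟨hn2, hlen, hpq, hp0, hpn, hpa, hget, hnone, hstk, hcnt, hdlen⟩ := hF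
  rw [pvStepA_def, pvStepB_def]
  by_cases hU : pvOp c = "U"
  · rw [if_pos hU, if_pos hU]
    dsimp only
    have hq : q = p := hpq.symm
    subst hq
    have hhop := pvHop_eq n linked alive hlen hn2 hget 0 (-1) (Or.inl ⟨rfl, rfl⟩)
      (pvXval c).toNat q hp0 hpn hpa
    refine ⟨⟨hn2, hlen, hhop.1, ?_, ?_, ?_, hget, hnone, hstk, hcnt, hdlen⟩, by simp [hU]⟩
    · exact hhop.2.1
    · exact hhop.2.2.1
    · exact hhop.2.2.2
  · rw [if_neg hU, if_neg hU]
    dsimp only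
    by_cases hD : pvOp c = "D"
    · rw [if_pos hD, if_pos hD]
      dsimp only
      have hq : q = p := hpq.symm
      subst hq
      have hhop := pvHop_eq n linked alive hlen hn2 hget 1 1 (Or.inr ⟨rfl, rfl⟩)
        (pvXval c).toNat q hp0 hpn hpa
      refine ⟨⟨hn2, hlen, hhop.1, ?_, ?_, ?_, hget, hnone, hstk, hcnt, hdlen⟩, by simp [hU, hD]⟩
      · exact hhop.2.1
      · exact hhop.2.2.1
      · exact hhop.2.2.2
    · rw [if_neg hD, if_neg hD]
      by_cases hCc : pvOp c = "C"
      · rw [if_pos hCc, if_pos hCc]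
        dsimp only
        have hq : q = p := hpq.symm
        subst hq
        have hgq : (PySem.Dict.get? linked q).getD [] = [pvScan alive q (-1), pvScan alive q 1] := by
          rw [hget q hp0 hpn hpa]
          rfl
        have hsd : PySem.List.pySetD alive q false = alive.set q.toNat false :=
          PySem.List.pySetD_of_nonneg alive false hp0
        simp only [hgq, pvGet2_zero, pvGet2_one, hsd]
        refine ⟨?_, by simp [hU, hD, hCc]⟩
        exact pvInv_C n linked deleted q alive stack q hinv (hC hCc)
      · rw [if_neg hCc, if_neg hCc]
        by_cases hZc : pvOp c = "Z"
        · rw [if_pos hZc, if_pos hZc]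
          have hlen1 := hZ hZc
          -- decompose the stacks
          obtain ⟨v, ws, hs⟩ : ∃ v ws, stack.reverse = v :: ws := by
            cases hrev : stack.reverse with
            | nil =>
              exfalso
              have : stack = [] := by
                have := congrArg List.reverse hrev
                simpa using this
              rw [this] at hlen1
              simp at hlen1
            | cons a l => exact ⟨a, l, rfl⟩
          obtain ⟨v', ln, ds, hd⟩ : ∃ v' ln ds, deleted.reverse = (v', ln) :: ds := by
            cases hrev : deleted.reverse with
            | nil =>
              exfalso
              rw [hrev, hs] at hstk
              exact hstk
            | cons a l => exact ⟨a.1, a.2, l, by simp [hrev]⟩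
          have hvv : v' = v := by
            rw [hd, hs] at hstk
            exact hstk.1
          subst hvv
          have hdel_eq : deleted = ds.reverse ++ [(v', ln)] := by
            have := congrArg List.reverse hd
            simpa using this
          have hstk_eq : stack = ws.reverse ++ [v'] := by
            have := congrArg List.reverse hs
            simpa using this
          rw [hdel_eq, hstk_eq, PySem.List.pop?_last, PySem.List.pop?_last]
          refine ⟨?_, ?_⟩
          · have hz := pvInv_Z n linked deleted p alive stack q hinv v' ln ds ws hd hs
            have hsd : PySem.List.pySetD alive v' true = alive.set v'.toNat true := by
              rw [hd, hs] at hstk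
              exact PySem.List.pySetD_of_nonneg alive true hstk.2.1
            simp only [hsd]
            exact hz
          · rw [if_neg hCc, if_pos hZc]
            simp
        · rw [if_neg hZc, if_neg hZc]
          dsimp only
          exact ⟨hinv, by simp [hU, hD, hCc, hZc]⟩

def pvOkN (n L : Int) (cs : List String) : Prop :=
  ∀ i : Nat, i ≤ cs.length →
    pvCntZ (cs.take i) - pvCntC (cs.take i) ≤ L ∧
    L + pvCntC (cs.take i) - pvCntZ (cs.take i) ≤ n - 1

lemma pvCntC_cons (c : String) (cs : List String) :
    pvCntC (c :: cs) = (if pvOp c = "C" then 1 else 0) + pvCntC cs := by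
  unfold pvCntC
  rw [List.countP_cons]
  by_cases hc : pvOp c = "C"
  · have : ((PySem.List.pyGet? (PySem.Str.split₀ c) 0).getD "" == "C") = true := by
      unfold pvOp at hc
      simp [hc]
    rw [this, if_pos hc]
    push_cast
    simp
    ring
  · have : ((PySem.List.pyGet? (PySem.Str.split₀ c) 0).getD "" == "C") = false := by
      unfold pvOp at hc
      simpa using hc
    rw [this, if_neg hc]
    push_cast
    simp

lemma pvCntZ_cons (c : String) (cs : List String) :
    pvCntZ (c :: cs) = (if pvOp c = "Z" then 1 else 0) + pvCntZ cs := by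
  unfold pvCntZ
  rw [List.countP_cons]
  by_cases hc : pvOp c = "Z"
  · have : ((PySem.List.pyGet? (PySem.Str.split₀ c) 0).getD "" == "Z") = true := by
      unfold pvOp at hc
      simp [hc]
    rw [this, if_pos hc]
    push_cast
    simp
    ring
  · have : ((PySem.List.pyGet? (PySem.Str.split₀ c) 0).getD "" == "Z") = false := by
      unfold pvOp at hc
      simpa using hc
    rw [this, if_neg hc]
    push_cast
    simp

lemma pvCnt_nil : pvCntC [] = 0 ∧ pvCntZ [] = 0 := by
  constructor <;> rfl

lemma pvOkN_tail (n L : Int) (c : String) (cs : List String) (h : pvOkN n L (c :: cs)) :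
    pvOkN n (L + (if pvOp c = "C" then 1 else 0) - (if pvOp c = "Z" then 1 else 0)) cs := by
  intro i hi
  have h2 := h (i + 1) (by simpa using Nat.succ_le_succ hi)
  rw [List.take_succ_cons, pvCntC_cons, pvCntZ_cons] at h2
  split_ifs at h2 ⊢ <;> omega

lemma pvOkN_head (n L : Int) (c : String) (cs : List String) (h : pvOkN n L (c :: cs)) :
    pvCntZ [c] - pvCntC [c] ≤ L ∧ L + pvCntC [c] - pvCntZ [c] ≤ n - 1 := by
  have h2 := h 1 (by simp)
  rwa [List.take_succ_cons, List.take_zero] at h2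

lemma pvMaster (n : Int) :
    ∀ (cs : List String) (linked : PySem.Dict Int (List Int)) (deleted : List (Int × List Int))
      (p : Int) (alive : List Bool) (stack : List Int) (q : Int),
      pvInv n linked deleted p alive stack q →
      pvOkN n (stack.length : Int) cs →
      pvInv n (cs.foldl pvStepA (linked, deleted, p)).1
        (cs.foldl pvStepA (linked, deleted, p)).2.1
        (cs.foldl pvStepA (linked, deleted, p)).2.2
        (cs.foldl pvStepB (alive, stack, q)).1
        (cs.foldl pvStepB (alive, stack, q)).2.1
        (cs.foldl pvStepB (alive, stack, q)).2.2 := by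
  intro cs
  induction cs with
  | nil => intro linked deleted p alive stack q hinv _; exact hinv
  | cons c cs ih =>
    intro linked deleted p alive stack q hinv hok
    rw [List.foldl_cons, List.foldl_cons]
    have hhead := pvOkN_head n (stack.length : Int) c cs hok
    have hC : pvOp c = "C" → (stack.length : Int) + 1 ≤ n - 1 := by
      intro hc
      have h1 := hhead.2
      rw [pvCntC_cons, pvCntZ_cons, if_pos hc,
        if_neg (by rw [hc]; exact fun hcc => by simp at hcc)] at h1
      have hc0 := pvCnt_nil.1
      have hz0 := pvCnt_nil.2
      omega
    have hZ : pvOp c = "Z" → 1 ≤ stack.length := by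
      intro hz
      have h1 := hhead.1
      rw [pvCntC_cons, pvCntZ_cons, if_pos hz,
        if_neg (by rw [hz]; exact fun hcc => by simp at hcc)] at h1
      have hc0 := pvCnt_nil.1
      have hz0 := pvCnt_nil.2
      omega
    obtain ⟨hinv', hlen'⟩ := pvStep_inv n c linked deleted p alive stack q hinv hC hZ
    have hok' := pvOkN_tail n (stack.length : Int) c cs hok
    rw [← hlen'] at hok'
    exact ih (pvStepA (linked, deleted, p) c).1 (pvStepA (linked, deleted, p) c).2.1
      (pvStepA (linked, deleted, p) c).2.2 (pvStepB (alive, stack, q) c).1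
      (pvStepB (alive, stack, q) c).2.1 (pvStepB (alive, stack, q) c).2.2 hinv' hok'

lemma pvInitLinked_aux (n : Int) (d0 : PySem.Dict Int (List Int)) :
    ∀ (m : Nat) (j : Int),
      ((PySem.List.pyRange 1 (1 + (m : Int))).foldl
        (fun d val =>
          if val = n - 1 then PySem.Dict.insert d val [val - 1, 0]
          else PySem.Dict.insert d val [val - 1, val + 1]) d0).get? j =
      if 1 ≤ j ∧ j < 1 + (m : Int) then
        some (if j = n - 1 then [j - 1, 0] else [j - 1, j + 1])
      else d0.get? j := by
  intro m
  induction m with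
  | zero =>
    intro j
    rw [PySem.List.pyRange_one_eq_nil (by norm_num)]
    rw [if_neg (by omega)]
    rfl
  | succ m ih =>
    intro j
    have hsplit : PySem.List.pyRange 1 (1 + ((m + 1 : Nat) : Int)) =
        PySem.List.pyRange 1 (1 + (m : Int)) ++ [1 + (m : Int)] := by
      have : (1 : Int) + ((m + 1 : Nat) : Int) = (1 + (m : Int)) + 1 := by push_cast; ring
      rw [this, PySem.List.pyRange_one_succ_right (by omega)]
    rw [hsplit, List.foldl_append]
    simp only [List.foldl_cons, List.foldl_nil]
    by_cases hlast : (1 + (m : Int)) = n - 1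
    · rw [if_pos hlast, PySem.Dict.get?_insert]
      by_cases hj : j = 1 + (m : Int)
      · rw [if_pos hj, if_pos (show (1:Int) ≤ j ∧ j < 1 + ((m+1 : Nat) : Int) by push_cast; omega),
          if_pos (show j = n - 1 by omega)]
        rw [hj, hlast]
      · rw [if_neg hj, ih j]
        push_cast
        push_cast at hj
        split_ifs <;> first | rfl | omega
    · rw [if_neg hlast, PySem.Dict.get?_insert]
      by_cases hj : j = 1 + (m : Int)
      · rw [if_pos hj, if_pos (show (1:Int) ≤ j ∧ j < 1 + ((m+1 : Nat) : Int) by push_cast; omega),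
          if_neg (show ¬ j = n - 1 by omega)]
        rw [hj]
      · rw [if_neg hj, ih j]
        push_cast
        push_cast at hj
        split_ifs <;> first | rfl | omega

lemma pvInitLinked_get? (n : Int) (hn2 : 2 ≤ n) (j : Int) :
    (pvInitLinked n).get? j =
      if 0 ≤ j ∧ j < n then
        some (if j = 0 then [n - 1, 1] else if j = n - 1 then [j - 1, 0] else [j - 1, j + 1])
      else none := by
  unfold pvInitLinked
  have hm : n = 1 + (((n - 1).toNat : Nat) : Int) := by omega
  rw [show PySem.List.pyRange 1 n = PySem.List.pyRange 1 (1 + (((n - 1).toNat : Nat) : Int)) by rw [← hm]]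
  rw [pvInitLinked_aux n _ ((n - 1).toNat) j]
  rw [← hm]
  by_cases hj1 : 1 ≤ j ∧ j < n
  · rw [if_pos hj1, if_pos (show (0:Int) ≤ j ∧ j < n by omega),
      if_neg (show ¬ j = 0 by omega)]
  · rw [if_neg hj1]
    by_cases hj0 : j = 0
    · rw [if_pos (show (0:Int) ≤ j ∧ j < n by omega), if_pos hj0, hj0,
        PySem.Dict.get?_insert, if_pos rfl]
    · rw [if_neg (show ¬((0:Int) ≤ j ∧ j < n) by omega), PySem.Dict.get?_insert, if_neg hj0]
      rfl

lemma pvRep_scan_m (n : Int) (hn2 : 2 ≤ n) (j : Int) (hj0 : 0 ≤ j) (hjn : j < n) :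
    pvScan (List.replicate n.toNat true) j (-1) = if j = 0 then n - 1 else j - 1 := by
  have h1 : pvScan (List.replicate n.toNat true) j (-1) = (j + -1) % ((n.toNat : Nat) : Int) := by
    rw [pvScan_replicate n.toNat (by omega) j (-1)]
  rw [h1]
  have hc : ((n.toNat : Nat) : Int) = n := by omega
  rw [hc]
  by_cases hj : j = 0
  · rw [if_pos hj, hj]
    norm_num
    rw [show (-1 : Int) = (n - 1) + n * (-1) by ring, Int.add_mul_emod_self_left,
      Int.emod_eq_of_lt (by omega) (by omega)]
  · rw [if_neg hj, Int.emod_eq_of_lt (by omega) (by omega)]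
    ring

lemma pvRep_scan_p (n : Int) (hn2 : 2 ≤ n) (j : Int) (hj0 : 0 ≤ j) (hjn : j < n) :
    pvScan (List.replicate n.toNat true) j 1 = if j = n - 1 then 0 else j + 1 := by
  have h1 : pvScan (List.replicate n.toNat true) j 1 = (j + 1) % ((n.toNat : Nat) : Int) := by
    rw [pvScan_replicate n.toNat (by omega) j 1]
  rw [h1]
  have hc : ((n.toNat : Nat) : Int) = n := by omega
  rw [hc]
  by_cases hj : j = n - 1
  · rw [if_pos hj, hj]
    rw [show n - 1 + 1 = 0 + n * 1 by ring, Int.add_mul_emod_self_left]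
    rfl
  · rw [if_neg hj, Int.emod_eq_of_lt (by omega) (by omega)]

lemma pvInv_init (n k : Int) (hn2 : 2 ≤ n) (hk0 : 0 ≤ k) (hkn : k < n) :
    pvInv n (pvInitLinked n) [] k (List.replicate n.toNat true) [] k := by
  have hlen : ((List.replicate n.toNat true).length : Int) = n := by simp; omega
  refine ⟨hn2, hlen, rfl, hk0, hkn, pvAliveAt_replicate n.toNat k hk0 (by omega), ?_, ?_, ?_, ?_, rfl⟩
  · intro j hj0 hjn _
    rw [pvInitLinked_get? n hn2 j, if_pos ⟨hj0, hjn⟩]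
    rw [pvRep_scan_m n hn2 j hj0 hjn, pvRep_scan_p n hn2 j hj0 hjn]
    by_cases hj : j = 0
    · rw [if_pos hj, if_pos hj, if_neg (show ¬ j = n - 1 by omega), hj]
      norm_num
    · rw [if_neg hj, if_neg hj]
      by_cases hj2 : j = n - 1
      · rw [if_pos hj2, if_pos hj2]
      · rw [if_neg hj2, if_neg hj2]
  · intro j hj0 hjn hdead
    rw [pvAliveAt_replicate n.toNat j hj0 (by omega)] at hdead
    simp at hdead
  · trivial
  · simp
    omega

lemma pvFlattenSingleton {α β : Type} (l : List α) (f : α → β) :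
    (l.map (fun v => [f v])).flatten = l.map f := by
  induction l with
  | nil => rfl
  | cons a l ih => simp_all

lemma pvStrFold (g : Int → String) :
    ∀ (l : List Int) (s : String),
      (l.foldl (fun ans val => ans ++ g val) s).toList =
        s.toList ++ (l.map (fun v => (g v).toList)).flatten := by
  intro l
  induction l with
  | nil => intro s; simp
  | cons a l ih =>
    intro s
    rw [List.foldl_cons, ih (s ++ g a)]
    rw [String.toList_append]
    simp

lemma pvAnswer (n : Int) (linked : PySem.Dict Int (List Int)) (alive : List Bool)
    (hn2 : 2 ≤ n) (hlen : (alive.length : Int) = n)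
    (hsome : ∀ j : Int, 0 ≤ j → j < n → pvAliveAt alive j = true → (linked.get? j).isSome = true)
    (hnone : ∀ j : Int, 0 ≤ j → j < n → pvAliveAt alive j = false → linked.get? j = none) :
    (PySem.List.pyRange 0 n).foldl
      (fun ans val => ans ++ (if PySem.Dict.contains linked val = false then "X" else "O")) "" =
    PySem.Str.join "" (alive.map (fun a => if a then "O" else "X")) := by
  apply String.toList_inj.mp
  rw [pvStrFold (fun val => if PySem.Dict.contains linked val = false then "X" else "O")]
  have hchar : ∀ v : Int,
      ((if PySem.Dict.contains linked v = false then "X" else "O") : String).toList =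
        [if PySem.Dict.contains linked v = false then 'X' else 'O'] := by
    intro v
    by_cases hv : PySem.Dict.contains linked v = false
    · rw [if_pos hv, if_pos hv]
      rfl
    · rw [if_neg hv, if_neg hv]
      rfl
  have hmapl : (PySem.List.pyRange 0 n).map
      (fun v => ((if PySem.Dict.contains linked v = false then "X" else "O") : String).toList) =
      (PySem.List.pyRange 0 n).map
      (fun v => [if PySem.Dict.contains linked v = false then 'X' else 'O']) := by
    apply List.map_congr_left
    intro v _
    exact hchar v
  rw [hmapl, pvFlattenSingleton]
  rw [PySem.Str.toList_join, List.map_map]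
  have hmapr : (alive.map (String.toList ∘ fun a => if a then "O" else "X")) =
      (alive.map (fun a => if a then 'O' else 'X')).map (fun c => [c]) := by
    rw [List.map_map]
    apply List.map_congr_left
    intro a _
    by_cases ha : a
    · simp [ha]
    · simp [ha]
  rw [hmapr]
  have hjoin : PySem.Chars.join ("" : String).toList
      ((alive.map (fun a => if a then 'O' else 'X')).map (fun c => [c])) =
      alive.map (fun a => if a then 'O' else 'X') :=
    PySem.Chars.join_nil_singletons _
  rw [hjoin]
  rw [show ("" : String).toList = [] from rfl, List.nil_append]
  rw [PySem.List.pyRange_zero, List.map_map]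
  apply List.ext_getElem
  · simp
    omega
  · intro i h1 h2
    simp only [List.getElem_map, List.getElem_range, Function.comp_apply]
    have h2' : i < alive.length := by simpa using h2
    have hi0 : (0:Int) ≤ (i:Int) := by omega
    have hin : (i:Int) < n := by
      simp at h1
      omega
    have hia : pvAliveAt alive (i:Int) = alive[i] := by
      unfold pvAliveAt
      simp only [Int.toNat_natCast]
      rw [List.getElem?_eq_getElem h2']
      rfl
    by_cases ha : alive[i]
    · have hcon : PySem.Dict.contains linked (i:Int) = true := by
        rw [PySem.Dict.contains_eq_isSome_get?]
        exact hsome (i:Int) hi0 hin (by rw [hia]; exact ha)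
      rw [hcon]
      simp [ha]
    · have hcon : PySem.Dict.contains linked (i:Int) = false := by
        rw [PySem.Dict.contains_eq_isSome_get?]
        rw [hnone (i:Int) hi0 hin (by rw [hia]; simpa using ha)]
        rfl
      rw [hcon]
      simp [ha]


lemma pvStepA_noop (st : PySem.Dict Int (List Int) × List (Int × List Int) × Int) (c : String)
    (hc : pvNoop c) : pvStepA st c = st := by
  obtain ⟨-, hcC, hcZ, hUD⟩ := hc
  rw [pvStepA_def]
  by_cases hU : pvOp c = "U"
  · rw [if_pos hU]
    have hx := (hUD (Or.inl hU)).2.2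
    have h0 : (pvXval c).toNat = 0 := by omega
    rw [h0]
    rfl
  · rw [if_neg hU]
    by_cases hD : pvOp c = "D"
    · rw [if_pos hD]
      have hx := (hUD (Or.inr hD)).2.2
      have h0 : (pvXval c).toNat = 0 := by omega
      rw [h0]
      rfl
    · rw [if_neg hD, if_neg hcC, if_neg hcZ]

lemma pvStepB_noop (st : List Bool × List Int × Int) (c : String)
    (hc : pvNoop c) : pvStepB st c = st := by
  obtain ⟨-, hcC, hcZ, hUD⟩ := hc
  rw [pvStepB_def]
  by_cases hU : pvOp c = "U"
  · rw [if_pos hU]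
    have hx := (hUD (Or.inl hU)).2.2
    have h0 : (pvXval c).toNat = 0 := by omega
    rw [h0]
    rfl
  · rw [if_neg hU]
    by_cases hD : pvOp c = "D"
    · rw [if_pos hD]
      have hx := (hUD (Or.inr hD)).2.2
      have h0 : (pvXval c).toNat = 0 := by omega
      rw [h0]
      rfl
    · rw [if_neg hD, if_neg hcC, if_neg hcZ]

lemma pvFoldA_noop (cs : List String) (h : ∀ c ∈ cs, pvNoop c)
    (st : PySem.Dict Int (List Int) × List (Int × List Int) × Int) :
    cs.foldl pvStepA st = st := by
  induction cs generalizing st with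
  | nil => rfl
  | cons c cs ih =>
    rw [List.foldl_cons, pvStepA_noop st c (h c (by simp))]
    exact ih (fun c hc => h c (by simp [hc])) st

lemma pvFoldB_noop (cs : List String) (h : ∀ c ∈ cs, pvNoop c)
    (st : List Bool × List Int × Int) :
    cs.foldl pvStepB st = st := by
  induction cs generalizing st with
  | nil => rfl
  | cons c cs ih =>
    rw [List.foldl_cons, pvStepB_noop st c (h c (by simp))]
    exact ih (fun c hc => h c (by simp [hc])) st

lemma pvInit_contains (n j : Int) (hj0 : 0 ≤ j) (hjn : j < n) :
    (pvInitLinked n).contains j = true := by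
  by_cases hn2 : 2 ≤ n
  · rw [PySem.Dict.contains_eq_isSome_get?, pvInitLinked_get? n hn2 j, if_pos ⟨hj0, hjn⟩]
    rfl
  · have hn1 : n = 1 := by omega
    have hj : j = 0 := by omega
    subst hn1
    subst hj
    decide

lemma pv_noop_eq (n k : Int) (cmd : List String) (h : ∀ c ∈ cmd, pvNoop c) :
    solution n k cmd = solution_alt n k cmd := by
  unfold solution solution_alt
  rw [pvFoldA_noop cmd h _, pvFoldB_noop cmd h _]
  dsimp only
  apply String.toList_inj.mp
  rw [pvStrFold (fun val => if PySem.Dict.contains (pvInitLinked n) val = false then "X" else "O")]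
  have hmapl : (PySem.List.pyRange 0 n).map
      (fun v => ((if PySem.Dict.contains (pvInitLinked n) v = false then "X" else "O") : String).toList) =
      (PySem.List.pyRange 0 n).map (fun _ => ['O']) := by
    apply List.map_congr_left
    intro v hv
    rw [PySem.List.mem_pyRange_one] at hv
    rw [pvInit_contains n v hv.1 hv.2]
    rfl
  rw [hmapl, pvFlattenSingleton]
  rw [PySem.Str.toList_join, List.map_map]
  have hmapr : (List.replicate n.toNat true).map (String.toList ∘ fun a => if a then "O" else "X") =
      ((List.replicate n.toNat true).map (fun _ => 'O')).map (fun c => [c]) := by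
    rw [List.map_map]
    apply List.map_congr_left
    intro a ha
    rw [List.eq_of_mem_replicate ha]
    rfl
  rw [hmapr, show ("" : String).toList = [] from rfl, PySem.Chars.join_nil_singletons,
    List.nil_append]
  rw [List.map_const', List.map_const']
  rw [PySem.List.length_pyRange_one]
  simp

lemma pv_solution_eq (n k : Int) (cmd : List String) (hpre : Pre_solution n k cmd) :
    solution n k cmd = solution_alt n k cmd := by
  rcases hpre with ⟨hn2, hk0, hkn, hwf, hcounts⟩ | hnoop
  case inr => exact pv_noop_eq n k cmd hnoop
  have hinv0 := pvInv_init n k hn2 hk0 hkn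
  have hok0 : pvOkN n ((([] : List Int).length : Nat) : Int) cmd := by
    intro i hi
    have := hcounts i (by omega)
    simp only [List.length_nil, Nat.cast_zero]
    constructor <;> omega
  have hfin := pvMaster n cmd (pvInitLinked n) [] k (List.replicate n.toNat true) [] k hinv0 hok0
  obtain ⟨hfn2, hflen, _, _, _, _, hfget, hfnone, _, _, _⟩ := hfin
  unfold solution solution_alt
  exact pvAnswer n _ _ hfn2 hflen (fun j h1 h2 h3 => by rw [hfget j h1 h2 h3]; rfl) hfnone

-- ===== VERDICT (by name: the statement is the Claim_ definition above) =====
theorem solution_spec : Claim_equal_solution := by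
  intro n k cmd _ hpre
  exact pv_solution_eq n k cmd hpre
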